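-- pv_equiv track=rewrite | github.com/mateuszkaczmarczyk999/Adventure-Game | advgame.py | gameboard
-- ===== SOURCE A (Python) =====
-- def gameboard(x=31, y=31):
--     """ MAKE PURE GAMEBOARD WITHOUT OBSTACLES"""
--     lista = []
--     for row in range(x):
--         lista.append([])
--         for column in range(y):
--             if row == 0 or row == x-1 or column == 0 or column == y-1:
--                 lista[row].append('X')
--             else:
--                 lista[row].append(' ')
--     return lista
-- ===== SOURCE B (Python) =====
-- def gameboard(x=31, y=31):
--     """ MAKE PURE GAMEBOARD WITHOUT OBSTACLES"""
--     if x <= 0: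
--         return []
--     border = ['X'] * y
--     interior = ['X'] + [' '] * (y - 2) + ['X'] if y >= 2 else ['X'] * y
--     lista = []
--     for row in range(x):
--         lista.append(list(border) if row == 0 or row == x - 1 else list(interior))
--     return lista
-- ===== Notes on version B (the rewrite author's own statement) =====
-- stated objective: simpler
-- what changed: Replaces the per-cell four-condition branch inside nested loops with two row templates (full border row, interior row) built once and copied per row.
import Mathlib
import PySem

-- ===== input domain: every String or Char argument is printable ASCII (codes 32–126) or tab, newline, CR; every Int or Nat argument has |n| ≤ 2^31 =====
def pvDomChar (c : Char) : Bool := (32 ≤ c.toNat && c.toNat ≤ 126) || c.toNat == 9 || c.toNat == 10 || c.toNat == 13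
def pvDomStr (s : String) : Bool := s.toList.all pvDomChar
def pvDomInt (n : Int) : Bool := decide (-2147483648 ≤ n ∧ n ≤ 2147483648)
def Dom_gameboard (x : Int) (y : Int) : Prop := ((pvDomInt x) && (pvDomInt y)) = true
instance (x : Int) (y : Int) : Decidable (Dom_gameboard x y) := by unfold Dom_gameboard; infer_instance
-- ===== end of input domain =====

-- B builds two row templates once and copies one per row, instead of A's per-cell branch; objective: simpler.

-- ===== PORT A =====
def gameboard (x : Int) (y : Int) : List (List String) :=
  (PySem.List.pyRange 0 x 1).foldl (fun lista row =>
    lista ++ [(PySem.List.pyRange 0 y 1).foldl (fun r column =>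
      r ++ [if row = 0 ∨ row = x - 1 ∨ column = 0 ∨ column = y - 1 then "X" else " "]) []]) []

-- ===== PORT B =====
def borderRow (y : Int) : List String := List.replicate y.toNat "X"
def interiorRow (y : Int) : List String :=
  if 2 ≤ y then "X" :: (List.replicate (y - 2).toNat " " ++ ["X"]) else List.replicate y.toNat "X"
def gameboard_alt (x : Int) (y : Int) : List (List String) :=
  if x ≤ 0 then [] else
  (PySem.List.pyRange 0 x 1).foldl (fun lista row =>
    lista ++ [if row = 0 ∨ row = x - 1 then borderRow y else interiorRow y]) []

-- ===== PRECONDITION & SPEC =====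
def Spec_gameboard (x : Int) (y : Int) (out : List (List String)) : Prop := out = gameboard_alt x y
instance (x : Int) (y : Int) (out : List (List String)) : Decidable (Spec_gameboard x y out) := by unfold Spec_gameboard; infer_instance

-- ===== CLAIM (what is proved, stated in full; the proofs are below) =====
def Claim_equal_gameboard : Prop := ∀ (x : Int) (y : Int), Dom_gameboard x y → Spec_gameboard x y (gameboard x y)

-- ===== LEMMAS AND PROOFS =====

theorem foldl_snoc {α β : Type} (f : α → β) (l : List α) (acc : List β) :
    l.foldl (fun a v => a ++ [f v]) acc = acc ++ l.map f := by
  induction l generalizing acc with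
  | nil => simp
  | cons h t ih => simp [List.foldl_cons, ih]

-- the inner loop of A produces exactly one of B's two templates
theorem inner_row (x y row : Int) :
    (PySem.List.pyRange 0 y 1).foldl (fun r column =>
      r ++ [if row = 0 ∨ row = x - 1 ∨ column = 0 ∨ column = y - 1 then "X" else " "]) []
      = if row = 0 ∨ row = x - 1 then borderRow y else interiorRow y := by
  rw [foldl_snoc]
  simp only [List.nil_append]
  by_cases hb : row = 0 ∨ row = x - 1
  · -- border row: the condition holds at every column
    rw [if_pos hb]
    have : ∀ c ∈ PySem.List.pyRange 0 y 1,
        (if row = 0 ∨ row = x - 1 ∨ c = 0 ∨ c = y - 1 then "X" else " ") = "X" := by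
      intro c _
      rcases hb with h | h <;> simp [h]
    rw [List.map_congr_left this, List.map_const', PySem.List.length_pyRange_one,
      borderRow]
    norm_num
  · rw [if_neg hb]
    push Not at hb
    obtain ⟨h1, h2⟩ := hb
    by_cases hy : 2 ≤ y
    · -- interior row: X, then y-2 spaces, then X
      have hmid : List.map (fun column =>
          if row = 0 ∨ row = x - 1 ∨ column = 0 ∨ column = y - 1 then "X" else " ")
          (PySem.List.pyRange 1 (y - 1) 1) = List.replicate (y - 2).toNat " " := by
        have h : ∀ c ∈ PySem.List.pyRange 1 (y - 1) 1,
            (if row = 0 ∨ row = x - 1 ∨ c = 0 ∨ c = y - 1 then "X" else " ") = " " := by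
          intro c hc
          rw [PySem.List.mem_pyRange_one] at hc
          have hc0 : c ≠ 0 := by omega
          have hc1 : c ≠ y - 1 := by omega
          simp [h1, h2, hc0, hc1]
        rw [List.map_congr_left h, List.map_const', PySem.List.length_pyRange_one]
        congr 1
        omega
      rw [PySem.List.pyRange_one_append 0 1 y (by omega) (by omega),
        PySem.List.pyRange_one_append 1 (y - 1) y (by omega) (by omega)]
      have e1 : PySem.List.pyRange 0 1 1 = [0] := PySem.List.pyRange_one_singleton 0
      have e2 : PySem.List.pyRange (y - 1) y 1 = [y - 1] := by
        have := PySem.List.pyRange_one_singleton (y - 1)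
        simpa using this
      simp only [List.map_append, e1, e2, List.map_cons, List.map_nil, hmid]
      simp [interiorRow, hy]
    · -- y < 2: interior row degenerates to the border row
      have h : ∀ c ∈ PySem.List.pyRange 0 y 1,
          (if row = 0 ∨ row = x - 1 ∨ c = 0 ∨ c = y - 1 then "X" else " ") = "X" := by
        intro c hc
        rw [PySem.List.mem_pyRange_one] at hc
        have : c = 0 := by omega
        simp [this]
      rw [List.map_congr_left h, List.map_const', PySem.List.length_pyRange_one,
        interiorRow, if_neg hy]
      norm_num

-- ===== VERDICT (by name: the statement is the Claim_ definition above) =====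
theorem gameboard_spec : Claim_equal_gameboard := by
  intro x y _
  unfold Spec_gameboard gameboard gameboard_alt
  by_cases hx : x ≤ 0
  · rw [if_pos hx, PySem.List.pyRange_one_eq_nil hx]
    simp
  rw [if_neg hx]
  rw [foldl_snoc, foldl_snoc]
  simp only [List.nil_append]
  apply List.map_congr_left
  intro row hrow
  clear hrow
  exact inner_row x y row
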